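-- pv_equiv track=rewrite | github.com/simaocaixas/University | FP/Proj.py | eh_intersecao_valida
-- ===== SOURCE A (Python) =====
-- def eh_intersecao(arg):
--
--      """
--
--      Recebe um argumento de qualquer tipo e devolve True se o argumento for de facto uma interseçao.
--      Esta função nunca deve retornar erros ao utilizador. Ou seja se o argumento for um tuplo em que a primeira
--      posição corresponde a uma coluna e segunda posição corresponder a uma linha, então deve retornar True, caso contrario False
--
--      eh_intersecao: universal -> booleano
--
--      """
--
--      colunas_possiveis = ["A","B","C","D","E","F","G","H","I","J","K","L","M","N","O","P","Q","R","S","T","U","V","W","X","Y","Z"]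
--      #Lista com as letras de A-Z possiveis para as colunas
--
--      if not isinstance(arg,tuple):
--           return False
--
--      elif len(arg) != 2:
--           return False
--
--      elif type(arg[0]) != str:
--           return False
--      elif type(arg[1]) != int:
--           return False
--      elif arg[0] not in colunas_possiveis:
--           return False
--
--      elif arg[1] < 1 or arg[1] > 99:
--           return False
--
--      else: return True
--
-- def eh_intersecao_valida(t, i):
--
--      """
--
--      Recebe um territorio e uma interceção e devolve True se a interceção corresponde de facto a uma interceção dentro do terriorio.
--      Ou seja retorna True se a interceção corresponde a uma das interceções linha coluna dentro do territorio.
--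
--      eh_intersecao_valida: territorio -> intersecao
--
--      """
--      if eh_intersecao(i):
--           colunas = {1:"A",2:"B",3:"C",4:"D",5:"E",6:"F",7:"G",8:"H",9:"I",10:"J",11:"K",12:"L",13:"M",14:"N",15:"O",16:"P",17:"Q",18:"R",19:"S",20:"T",21:"U",22:"V",23:"W",24:"X",25:"Y",26:"Z"}
--           coluna_valida = []
--           #variavel que vai armazenar as colunas validas para o territorio
--
--           linhas_validas = len(t[0])
--
--           for elemento in colunas:
--                if elemento < (len(t) + 1):
--                #len(t) + 1 pois a identação começa no 0
--                     coluna_valida.append(colunas[elemento])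
--           if not i[0] in coluna_valida:
--                return False
--           elif i[1] < 1 or i[1] > linhas_validas:
--                #garante que o valor da linha está entre 1 o valor maximo e minimo
--                return False
--           else:
--                return True
--      else:
--           return False
-- ===== SOURCE B (Python) =====
-- def eh_intersecao_valida(t, i):
--     # closed-form ordinal check instead of the dict + list-building loop
--     if not (isinstance(i, tuple) and len(i) == 2
--             and type(i[0]) == str and type(i[1]) == int
--             and len(i[0]) == 1 and 'A' <= i[0] <= 'Z'
--             and 1 <= i[1] <= 99):
--         return False
--     col = ord(i[0]) - ord('A') + 1
--     return col <= len(t) and 1 <= i[1] <= len(t[0])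
-- ===== Notes on version B (the rewrite author's own statement) =====
-- stated objective: simpler
-- what changed: B replaces A's 26-entry dict, the coluna_valida list and the populating loop by a closed-form ordinal check (col = ord(i[0])-ord('A')+1 <= len(t)) and replaces the 26-string membership list by a direct single-character range comparison.
import Mathlib
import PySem

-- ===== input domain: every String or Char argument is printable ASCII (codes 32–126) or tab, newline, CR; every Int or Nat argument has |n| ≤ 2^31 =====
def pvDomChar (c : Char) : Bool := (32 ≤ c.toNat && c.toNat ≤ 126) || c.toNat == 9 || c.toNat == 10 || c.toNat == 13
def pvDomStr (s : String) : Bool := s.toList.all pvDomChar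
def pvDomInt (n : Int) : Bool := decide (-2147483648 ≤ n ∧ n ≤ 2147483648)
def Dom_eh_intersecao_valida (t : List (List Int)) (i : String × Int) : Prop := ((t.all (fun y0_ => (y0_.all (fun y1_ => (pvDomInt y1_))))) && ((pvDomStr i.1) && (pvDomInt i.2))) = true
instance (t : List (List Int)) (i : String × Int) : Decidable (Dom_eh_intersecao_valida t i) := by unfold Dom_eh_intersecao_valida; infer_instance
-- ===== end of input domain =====

-- B replaces A's dict + coluna_valida-building loop and 26-string membership list by a closed-form
-- ordinal check (col = ord - ord('A') + 1 ≤ len t, single-char range comparison); objective: simpler.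


-- ===== PORT A =====
def pvColunasPossiveis : List String :=
  ["A","B","C","D","E","F","G","H","I","J","K","L","M","N","O","P","Q","R","S","T","U","V","W","X","Y","Z"]

-- eh_intersecao: the isinstance/len/type branches are always False→skipped for a (String × Int) argument
def pvEhIntersecao (arg : String × Int) : Bool :=
  if ¬ (arg.1 ∈ pvColunasPossiveis) then false
  else if arg.2 < 1 ∨ arg.2 > 99 then false
  else true

-- the colunas dict, iterated in insertion order (keys 1..26)
def pvColunas : List (Int × String) :=
  [(1,"A"),(2,"B"),(3,"C"),(4,"D"),(5,"E"),(6,"F"),(7,"G"),(8,"H"),(9,"I"),(10,"J"),(11,"K"),(12,"L"),(13,"M"),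
   (14,"N"),(15,"O"),(16,"P"),(17,"Q"),(18,"R"),(19,"S"),(20,"T"),(21,"U"),(22,"V"),(23,"W"),(24,"X"),(25,"Y"),(26,"Z")]

def eh_intersecao_valida (t : List (List Int)) (i : String × Int) : Bool :=
  if pvEhIntersecao i then
    match PySem.List.pyGet? t 0 with
    | none => false   -- t[0] raises IndexError in Python here; excluded by Pre_
    | some row =>
      let linhas_validas : Int := (row.length : Int)
      let coluna_valida : List String :=
        pvColunas.foldl (fun acc p => if p.1 < (t.length : Int) + 1 then acc ++ [p.2] else acc) []
      if ¬ (i.1 ∈ coluna_valida) then false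
      else if i.2 < 1 ∨ i.2 > linhas_validas then false
      else true
  else false

-- ===== PORT B =====
def eh_intersecao_valida_alt (t : List (List Int)) (i : String × Int) : Bool :=
  match i.1.toList with
  | [c] =>
    if ('A' ≤ c && c ≤ 'Z') && (1 ≤ i.2 && i.2 ≤ 99) then
      let col : Int := (c.toNat : Int) - 65 + 1
      if col ≤ (t.length : Int) then
        match t with
        | [] => false   -- unreachable: col ≥ 1 forces t nonempty (Python short-circuits before t[0])
        | row :: _ => decide (1 ≤ i.2) && decide (i.2 ≤ (row.length : Int))
      else false
    else false
  | _ => false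

-- ===== PRECONDITION & SPEC =====
-- Pre_ excludes exactly the inputs where A raises IndexError at len(t[0]): empty territory with a valid intersection.
def Pre_eh_intersecao_valida (t : List (List Int)) (i : String × Int) : Prop :=
  ¬ (t = [] ∧ i.1 ∈ (["A","B","C","D","E","F","G","H","I","J","K","L","M","N","O","P","Q","R","S","T","U","V","W","X","Y","Z"] : List String) ∧ 1 ≤ i.2 ∧ i.2 ≤ 99)
instance (t : List (List Int)) (i : String × Int) : Decidable (Pre_eh_intersecao_valida t i) := by unfold Pre_eh_intersecao_valida; infer_instance
def pvWitness_eh_intersecao_valida : List (List Int) × (String × Int) := ([[0]], ("A", 1))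

def Spec_eh_intersecao_valida (t : List (List Int)) (i : String × Int) (out : Bool) : Prop := out = eh_intersecao_valida_alt t i
instance (t : List (List Int)) (i : String × Int) (out : Bool) : Decidable (Spec_eh_intersecao_valida t i out) := by unfold Spec_eh_intersecao_valida; infer_instance

-- ===== CLAIM (what is proved, stated in full; the proofs are below) =====
def Claim_equal_eh_intersecao_valida : Prop := ∀ (t : List (List Int)) (i : String × Int), Dom_eh_intersecao_valida t i → Pre_eh_intersecao_valida t i → Spec_eh_intersecao_valida t i (eh_intersecao_valida t i)
-- ===== LEMMAS AND PROOFS =====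

-- a single char in A..Z makes its one-letter string a member of the 26-letter list
lemma mem_of_char_range (c : Char) (h1 : 'A' ≤ c) (h2 : c ≤ 'Z') :
    String.ofList [c] ∈ pvColunasPossiveis := by
  have hl : 65 ≤ c.toNat := Nat.succ_le_of_lt h1
  have hr : c.toNat ≤ 90 := Fin.mk_le_mk.mp h2
  interval_cases h : c.toNat <;>
    (have hc := Char.ofNat_toNat c; rw [h] at hc; rw [← hc]; decide)

set_option maxHeartbeats 2000000 in
theorem eh_intersecao_valida_spec : Claim_equal_eh_intersecao_valida := by
  intro t i _ hpre
  obtain ⟨s, n⟩ := i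
  unfold Spec_eh_intersecao_valida
  by_cases hm : s ∈ pvColunasPossiveis
  · simp only [pvColunasPossiveis, List.mem_cons, List.not_mem_nil, or_false] at hm
    rcases hm with rfl | rfl | rfl | rfl | rfl | rfl | rfl | rfl | rfl | rfl | rfl | rfl | rfl | rfl | rfl | rfl | rfl | rfl | rfl | rfl | rfl | rfl | rfl | rfl | rfl | rfl <;>
    · cases t with
      | nil =>
        simp [eh_intersecao_valida, eh_intersecao_valida_alt, pvEhIntersecao,
          pvColunasPossiveis, PySem.List.pyGet?, PySem.List.pyIdx?]
      | cons row rest =>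
        have hfold := PySem.List.foldl_append_if
          (fun p : Int × String => decide (p.1 < ((((row :: rest).length : Nat) : Int) + 1)))
          Prod.snd pvColunas []
        simp only [decide_eq_true_eq] at hfold
        simp only [eh_intersecao_valida, eh_intersecao_valida_alt, pvEhIntersecao, pvColunasPossiveis]
        rw [hfold]
        simp [pvColunas, PySem.List.pyGet?, PySem.List.pyIdx?, List.mem_map, List.mem_filter]
        rw [Bool.eq_iff_iff]
        simp only [Bool.and_eq_true, Bool.not_eq_true', decide_eq_true_eq, decide_eq_false_iff_not]
        try simp only [← List.length_eq_zero_iff]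
        omega
  · have hB : eh_intersecao_valida_alt t (s, n) = false := by
      rcases hcl : s.toList with _ | ⟨c, tl⟩
      · simp [eh_intersecao_valida_alt, hcl]
      · rcases tl with _ | ⟨c2, tl2⟩
        · by_cases hA : 'A' ≤ c ∧ c ≤ 'Z'
          · exfalso
            apply hm
            have hs : s = String.ofList [c] := by
              rw [← hcl]
              exact String.ofList_toList.symm
            rw [hs]
            exact mem_of_char_range c hA.1 hA.2
          · simp [eh_intersecao_valida_alt, hcl]
            tauto
        · simp [eh_intersecao_valida_alt, hcl]
    rw [hB]
    simp [eh_intersecao_valida, pvEhIntersecao, hm]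

-- ===== VERDICT (by name: the statement is the Claim_ definition above) =====
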